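-- pv_equiv track=rewrite | github.com/manuBurk/OwnCubi | connectedlines_lot.py | check_same_value
-- ===== SOURCE A (Python) =====
-- def check_same_value(current_list, bigger_lists):
--     x1 = current_list[0][0]
--     x2 = current_list[-1][1]
--     for list in bigger_lists:
--         for i, tuple in enumerate(list):
--             if x1 == tuple[1]:
--                 split1 = list[:i+1]
--                 split2 = list[i+1:]
--                 reverse = [t[::-1] for t in current_list[::-1]]
--                 new = split1 + current_list + reverse + split2
--                 return new
--             if x2 == tuple[0]:
--                 split1 = list[:i]
--                 split2 = list[i:]
--                 reverse = [t[::-1] for t in current_list[::-1]]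
--                 new = split1 + reverse + current_list + split2
--                 return new
--     return(current_list)
-- ===== SOURCE B (Python) =====
-- def check_same_value(current_list, bigger_lists):
--     x1 = current_list[0][0]
--     x2 = current_list[-1][1]
--     rev = [(b, a) for (a, b) in reversed(current_list)]
--     for lst in bigger_lists:
--         i1 = next((i for i, t in enumerate(lst) if t[1] == x1), None)
--         i2 = next((i for i, t in enumerate(lst) if t[0] == x2), None)
--         if i1 is not None and (i2 is None or i1 <= i2):
--             return lst[:i1 + 1] + current_list + rev + lst[i1 + 1:]
--         if i2 is not None:
--             return lst[:i2] + rev + current_list + lst[i2:]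
--     return current_list
-- ===== Notes on version B (the rewrite author's own statement) =====
-- stated objective: simpler
-- what changed: Per candidate list B runs two first-match index searches (one per endpoint predicate) and picks the earlier hit (x1 wins ties), and computes the reversed-swapped copy once up front, instead of A's single indexed scan with inline branches rebuilding the reversal at the match.
-- outside the precondition, e.g. on check_same_value([], [[(1, 2)]]): A raises IndexError, B raises IndexError
import Mathlib
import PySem

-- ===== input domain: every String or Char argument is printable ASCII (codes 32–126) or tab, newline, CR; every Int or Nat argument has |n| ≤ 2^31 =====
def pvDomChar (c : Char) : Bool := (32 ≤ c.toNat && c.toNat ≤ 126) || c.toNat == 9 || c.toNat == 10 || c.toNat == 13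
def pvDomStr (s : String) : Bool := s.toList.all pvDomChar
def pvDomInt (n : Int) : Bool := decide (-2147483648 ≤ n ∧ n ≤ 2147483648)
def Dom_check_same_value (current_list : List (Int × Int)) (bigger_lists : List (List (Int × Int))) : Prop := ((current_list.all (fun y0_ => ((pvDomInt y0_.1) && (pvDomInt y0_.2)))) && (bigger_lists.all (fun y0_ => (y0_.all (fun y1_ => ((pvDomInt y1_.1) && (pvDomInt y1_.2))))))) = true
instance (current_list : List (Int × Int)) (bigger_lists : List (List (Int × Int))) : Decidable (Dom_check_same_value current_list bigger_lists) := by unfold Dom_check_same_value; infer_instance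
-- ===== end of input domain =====

-- B precomputes the reversed-and-swapped copy once and, per list, finds the two candidate
-- indices with first-match searches instead of A's single indexed scan with inline branches
-- (objective: simpler decomposition; same asymptotic cost).

-- ===== PORT A =====
-- [t[::-1] for t in current_list[::-1]] : pair reversal is a swap, list[::-1] is reverse
def pvRevSwap (cl : List (Int × Int)) : List (Int × Int) :=
  cl.reverse.map (fun t => (t.2, t.1))

-- inner 'for i, tuple in enumerate(list)' loop; slices list[:i+1]/list[i+1:] etc. with
-- 0 ≤ i < len(list) are exactly take/drop
def pvScanA (x1 x2 : Int) (cl lst : List (Int × Int)) (i : Nat) :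
    List (Int × Int) → Option (List (Int × Int))
  | [] => none
  | t :: rest =>
    if x1 = t.2 then
      some (lst.take (i + 1) ++ cl ++ pvRevSwap cl ++ lst.drop (i + 1))
    else if x2 = t.1 then
      some (lst.take i ++ pvRevSwap cl ++ cl ++ lst.drop i)
    else pvScanA x1 x2 cl lst (i + 1) rest

-- outer 'for list in bigger_lists' loop (a hit returns immediately)
def pvOuterA (x1 x2 : Int) (cl : List (Int × Int)) :
    List (List (Int × Int)) → List (Int × Int)
  | [] => cl
  | l :: rest =>
    match pvScanA x1 x2 cl l 0 l with
    | some r => r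
    | none => pvOuterA x1 x2 cl rest

def check_same_value (current_list : List (Int × Int)) (bigger_lists : List (List (Int × Int))) : List (Int × Int) :=
  -- current_list[0][0] and current_list[-1][1]; none = IndexError (excluded by Pre_)
  match PySem.List.pyGet? current_list 0, PySem.List.pyGet? current_list (-1) with
  | some p, some q => pvOuterA p.1 q.2 current_list bigger_lists
  | _, _ => []

-- ===== PORT B =====
-- [(b, a) for (a, b) in reversed(current_list)]
def pvRevB (cl : List (Int × Int)) : List (Int × Int) :=
  cl.reverse.map (fun t => (t.2, t.1))
-- per list: first index with t[1] == x1, first index with t[0] == x2, pick the earlier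
-- (x1-case wins a tie) and splice there
def pvSpliceB (cl rev lst : List (Int × Int)) (i1 i2 : Option Nat) :
    Option (List (Int × Int)) :=
  match i1, i2 with
  | some i, some j =>
    if i ≤ j then some (lst.take (i + 1) ++ cl ++ rev ++ lst.drop (i + 1))
    else some (lst.take j ++ rev ++ cl ++ lst.drop j)
  | some i, none => some (lst.take (i + 1) ++ cl ++ rev ++ lst.drop (i + 1))
  | none, some j => some (lst.take j ++ rev ++ cl ++ lst.drop j)
  | none, none => none

def pvOuterB (x1 x2 : Int) (cl rev : List (Int × Int)) :
    List (List (Int × Int)) → List (Int × Int)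
  | [] => cl
  | l :: rest =>
    match pvSpliceB cl rev l (l.findIdx? (fun t => t.2 == x1)) (l.findIdx? (fun t => t.1 == x2)) with
    | some r => r
    | none => pvOuterB x1 x2 cl rev rest

def check_same_value_alt (current_list : List (Int × Int)) (bigger_lists : List (List (Int × Int))) : List (Int × Int) :=
  match PySem.List.pyGet? current_list 0 with
  | none => []
  | some p =>
    match PySem.List.pyGet? current_list (-1) with
    | none => []
    | some q => pvOuterB p.1 q.2 current_list (pvRevB current_list) bigger_lists

-- ===== PRECONDITION & SPEC =====
-- A raises IndexError on an empty current_list (current_list[0]); excluded.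
def Pre_check_same_value (current_list : List (Int × Int)) (bigger_lists : List (List (Int × Int))) : Prop :=
  current_list ≠ []
instance (current_list : List (Int × Int)) (bigger_lists : List (List (Int × Int))) : Decidable (Pre_check_same_value current_list bigger_lists) := by unfold Pre_check_same_value; infer_instance

def pvWitness_check_same_value : (List (Int × Int)) × (List (List (Int × Int))) :=
  ([(1, 2)], [[(2, 3), (4, 5)]])

def Spec_check_same_value (current_list : List (Int × Int)) (bigger_lists : List (List (Int × Int))) (out : List (Int × Int)) : Prop := out = check_same_value_alt current_list bigger_lists
instance (current_list : List (Int × Int)) (bigger_lists : List (List (Int × Int))) (out : List (Int × Int)) : Decidable (Spec_check_same_value current_list bigger_lists out) := by unfold Spec_check_same_value; infer_instance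

-- ===== CLAIM (what is proved, stated in full; the proofs are below) =====
def Claim_equal_check_same_value : Prop := ∀ (current_list : List (Int × Int)) (bigger_lists : List (List (Int × Int))), Dom_check_same_value current_list bigger_lists → Pre_check_same_value current_list bigger_lists → Spec_check_same_value current_list bigger_lists (check_same_value current_list bigger_lists)

-- ===== LEMMAS AND PROOFS =====

theorem pvRevB_eq (cl : List (Int × Int)) : pvRevB cl = pvRevSwap cl := rfl

-- A's indexed scan over a suffix equals B's two first-match searches over that suffix
-- (indices offset by i), with B's tie/min selection.
theorem pvScanA_eq_spliceB (x1 x2 : Int) (cl lst : List (Int × Int)) :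
    ∀ (s : List (Int × Int)) (i : Nat),
      pvScanA x1 x2 cl lst i s =
        (match s.findIdx? (fun t => t.2 == x1), s.findIdx? (fun t => t.1 == x2) with
         | some a, some b =>
           if a ≤ b then
             some (lst.take (i + a + 1) ++ cl ++ pvRevSwap cl ++ lst.drop (i + a + 1))
           else some (lst.take (i + b) ++ pvRevSwap cl ++ cl ++ lst.drop (i + b))
         | some a, none =>
           some (lst.take (i + a + 1) ++ cl ++ pvRevSwap cl ++ lst.drop (i + a + 1))
         | none, some b =>
           some (lst.take (i + b) ++ pvRevSwap cl ++ cl ++ lst.drop (i + b))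
         | none, none => none) := by
  intro s
  induction s with
  | nil => intro i; simp [pvScanA]
  | cons t rest ih =>
    intro i
    by_cases h1 : x1 = t.2
    · have ht : (t.2 == x1) = true := by simp [h1]
      by_cases h2 : x2 = t.1
      · have ht2 : (t.1 == x2) = true := by simp [h2]
        simp [pvScanA, h1, List.findIdx?_cons, ht2]
      · have ht2 : (t.1 == x2) = false := by
          rw [beq_eq_false_iff_ne]; exact fun h => h2 h.symm
        simp only [pvScanA, if_pos h1, List.findIdx?_cons, ht, ht2, if_true, if_false,
          Bool.false_eq_true]
        cases hr : rest.findIdx? (fun t => t.1 == x2) <;> simp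
    · have h1' : (t.2 == x1) = false := by
        rw [beq_eq_false_iff_ne]; exact fun h => h1 h.symm
      by_cases h2 : x2 = t.1
      · have h2' : (t.1 == x2) = true := by simp [h2]
        simp only [pvScanA, if_neg h1, if_pos h2, List.findIdx?_cons, h1', h2',
          Bool.false_eq_true, if_false, if_true]
        cases hr : rest.findIdx? (fun t => t.2 == x1) <;> simp
      · have h2' : (t.1 == x2) = false := by
          rw [beq_eq_false_iff_ne]; exact fun h => h2 h.symm
        simp only [pvScanA, if_neg h1, if_neg h2, List.findIdx?_cons, h1', h2',
          Bool.false_eq_true, if_false]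
        rw [ih (i + 1)]
        cases hr1 : rest.findIdx? (fun t => t.2 == x1) with
        | none =>
          cases hr2 : rest.findIdx? (fun t => t.1 == x2) with
          | none => rfl
          | some b =>
            simp only [Option.map_none, Option.map_some]
            rw [show i + 1 + b = i + (b + 1) from by omega]
        | some a =>
          cases hr2 : rest.findIdx? (fun t => t.1 == x2) with
          | none =>
            simp only [Option.map_none, Option.map_some]
            rw [show i + 1 + a = i + (a + 1) from by omega]
          | some b =>
            simp only [Option.map_some]
            rw [show i + 1 + a = i + (a + 1) from by omega,
                show i + 1 + b = i + (b + 1) from by omega]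
            by_cases hab : a ≤ b
            · rw [if_pos hab, if_pos (by omega)]
            · rw [if_neg hab, if_neg (by omega)]

theorem pvOuterA_eq_pvOuterB (x1 x2 : Int) (cl : List (Int × Int)) :
    ∀ bls : List (List (Int × Int)),
      pvOuterA x1 x2 cl bls = pvOuterB x1 x2 cl (pvRevSwap cl) bls := by
  intro bls
  induction bls with
  | nil => rfl
  | cons l rest ih =>
    simp only [pvOuterA, pvOuterB, pvScanA_eq_spliceB x1 x2 cl l l 0, pvSpliceB]
    cases l.findIdx? (fun t => t.2 == x1) <;> cases l.findIdx? (fun t => t.1 == x2) <;>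
      simp_all

-- ===== VERDICT (by name: the statement is the Claim_ definition above) =====
theorem check_same_value_spec : Claim_equal_check_same_value := by
  intro cl bls _ _
  unfold Spec_check_same_value check_same_value check_same_value_alt
  cases h0 : PySem.List.pyGet? cl 0 <;> cases h1 : PySem.List.pyGet? cl (-1) <;>
    simp [pvOuterA_eq_pvOuterB, pvRevB_eq]
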